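-- pv_equiv track=rewrite | github.com/dagbankurli/dagbankurli.github.io | import_dictionary_data.py | clean_and_deduplicate
-- ===== SOURCE A (Python) =====
-- def clean_and_deduplicate(words):
--     """Clean and remove duplicate entries"""
--     seen = set()
--     cleaned = []
--
--     for word in words:
--         # Clean whitespace
--         word['english'] = word.get('english', '').strip()
--         word['dagbani'] = word.get('dagbani', '').strip()
--
--         # Skip empty entries
--         if not word['english'] or not word['dagbani']:
--             continue
--
--         # Skip if too long (probably not a word)
--         if len(word['english']) > 200 or len(word['dagbani']) > 200:
--             continue
--
--         # Check for duplicates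
--         key = (word['english'].lower(), word['dagbani'].lower())
--         if key not in seen:
--             seen.add(key)
--             cleaned.append(word)
--
--     return cleaned
-- ===== SOURCE B (Python) =====
-- def clean_and_deduplicate(words):
--     """Clean in place, then keep each word iff it is the first valid occurrence of
--     its lowercased key, decided by rescanning the prefix (no seen-set, no dict)."""
--     for word in words:
--         word['english'] = word.get('english', '').strip()
--         word['dagbani'] = word.get('dagbani', '').strip()
--
--     def valid(w):
--         return (w['english'] != '' and w['dagbani'] != ''
--                 and len(w['english']) <= 200 and len(w['dagbani']) <= 200)
--
--     def key(w):
--         return (w['english'].lower(), w['dagbani'].lower())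
--
--     result = []
--     for i, word in enumerate(words):
--         if valid(word) and not any(valid(u) and key(u) == key(word) for u in words[:i]):
--             result.append(word)
--     return result
-- ===== Notes on version B (the rewrite author's own statement) =====
-- stated objective: alternative
-- what changed: The seen-set maintained across the loop is eliminated: after stripping all entries, each word is kept iff it is valid and no earlier valid word has the same lowercased key, decided by a brute-force rescan of the prefix words[:i] instead of any keyed container.
import Mathlib
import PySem

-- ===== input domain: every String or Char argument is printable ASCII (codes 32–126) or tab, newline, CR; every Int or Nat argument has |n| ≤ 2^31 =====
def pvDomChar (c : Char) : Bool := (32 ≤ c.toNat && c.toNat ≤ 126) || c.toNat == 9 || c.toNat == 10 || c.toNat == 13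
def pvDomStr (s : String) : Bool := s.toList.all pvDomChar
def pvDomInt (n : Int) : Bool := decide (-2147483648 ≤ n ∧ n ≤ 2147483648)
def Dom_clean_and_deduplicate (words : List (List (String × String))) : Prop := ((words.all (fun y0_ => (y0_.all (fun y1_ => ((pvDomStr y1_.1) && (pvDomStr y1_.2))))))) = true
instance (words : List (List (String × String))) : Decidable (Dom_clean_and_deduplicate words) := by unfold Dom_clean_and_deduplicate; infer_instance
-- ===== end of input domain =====

-- B replaces A's running seen-set by a brute-force rescan of the already-processed prefix:
-- after stripping all entries in place, a word is kept iff it is valid and no earlier valid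
-- word has the same lowercased key (same return value; A also mutates the word dicts in
-- place — B performs the same mutation; the proof is about the return value).


-- ===== PORT A =====
-- one loop: strip both fields in place, skip empty/overlong, dedupe with a seen set + result list
def clean_and_deduplicate (words : List (List (String × String))) : List (List (String × String)) :=
  (words.foldl
    (fun (st : PySem.Set (String × String) × List (List (String × String))) w =>
      let wd0 := PySem.Dict.mk w
      let wd1 := wd0.insert "english" (PySem.Str.strip (wd0.getD "english" ""))
      let wd  := wd1.insert "dagbani" (PySem.Str.strip (wd1.getD "dagbani" ""))
      let e := wd.getD "english" ""
      let g := wd.getD "dagbani" ""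
      if e = "" ∨ g = "" then st
      else if 200 < PySem.Str.len e ∨ 200 < PySem.Str.len g then st
      else
        let key := (PySem.Str.lower e, PySem.Str.lower g)
        if PySem.Set.contains st.1 key then st
        else (PySem.Set.add st.1 key, st.2 ++ [wd.items]))
    (PySem.Set.empty, [])).2

-- ===== PORT B =====
-- pass 1 of Source B: strip both fields of one word (an in-place mutation in Python; a value here)
def stripWord (w : List (String × String)) : List (String × String) :=
  let wd0 := PySem.Dict.mk w
  let wd1 := wd0.insert "english" (PySem.Str.strip (wd0.getD "english" ""))
  (wd1.insert "dagbani" (PySem.Str.strip (wd1.getD "dagbani" ""))).items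

-- Source B's valid(w)
def validB (w : List (String × String)) : Bool :=
  let e := (PySem.Dict.mk w).getD "english" ""
  let g := (PySem.Dict.mk w).getD "dagbani" ""
  !(e == "") && !(g == "") && decide (PySem.Str.len e ≤ 200) && decide (PySem.Str.len g ≤ 200)

-- Source B's key(w)
def keyOf (w : List (String × String)) : String × String :=
  let e := (PySem.Dict.mk w).getD "english" ""
  let g := (PySem.Dict.mk w).getD "dagbani" ""
  (PySem.Str.lower e, PySem.Str.lower g)

def clean_and_deduplicate_alt (words : List (List (String × String))) : List (List (String × String)) :=
  let stripped := words.map stripWord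
  (PySem.List.enumerate stripped 0).foldl
    (fun res iw =>
      if validB iw.2 &&
         !((PySem.List.slice stripped none (some iw.1)).any
             (fun u => validB u && decide (keyOf u = keyOf iw.2)))
      then res ++ [iw.2] else res)
    []

-- ===== PRECONDITION & SPEC =====
def Spec_clean_and_deduplicate (words : List (List (String × String))) (out : List (List (String × String))) : Prop := out = clean_and_deduplicate_alt words
instance (words : List (List (String × String))) (out : List (List (String × String))) : Decidable (Spec_clean_and_deduplicate words out) := by unfold Spec_clean_and_deduplicate; infer_instance

-- ===== CLAIM (what is proved, stated in full; the proofs are below) =====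
def Claim_equal_clean_and_deduplicate : Prop := ∀ (words : List (List (String × String))), Dom_clean_and_deduplicate words → Spec_clean_and_deduplicate words (clean_and_deduplicate words)

-- ===== LEMMAS AND PROOFS =====

-- A's loop body, named
def stepA (st : PySem.Set (String × String) × List (List (String × String)))
    (w : List (String × String)) :
    PySem.Set (String × String) × List (List (String × String)) :=
  let wd0 := PySem.Dict.mk w
  let wd1 := wd0.insert "english" (PySem.Str.strip (wd0.getD "english" ""))
  let wd  := wd1.insert "dagbani" (PySem.Str.strip (wd1.getD "dagbani" ""))
  let e := wd.getD "english" ""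
  let g := wd.getD "dagbani" ""
  if e = "" ∨ g = "" then st
  else if 200 < PySem.Str.len e ∨ 200 < PySem.Str.len g then st
  else
    let key := (PySem.Str.lower e, PySem.Str.lower g)
    if PySem.Set.contains st.1 key then st
    else (PySem.Set.add st.1 key, st.2 ++ [wd.items])

-- A's loop body rephrased with Source B's helpers, for already-stripped words
def stepC (st : PySem.Set (String × String) × List (List (String × String)))
    (w : List (String × String)) :
    PySem.Set (String × String) × List (List (String × String)) :=
  if validB w && !(PySem.Set.contains st.1 (keyOf w))
  then (PySem.Set.add st.1 (keyOf w), st.2 ++ [w])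
  else st

theorem contains_add (s : PySem.Set (String × String)) (k k' : String × String)
    (h : PySem.Set.contains s k = false) :
    PySem.Set.contains (PySem.Set.add s k) k' = (PySem.Set.contains s k' || (k' == k)) := by
  have hk : k ∉ s := by simpa [PySem.Set.contains] using h
  by_cases hq : k' = k
  · simp [PySem.Set.add, PySem.Set.contains, hk, hq]
  · simp [PySem.Set.add, PySem.Set.contains, hk, hq]

-- A's step, in terms of Source B's helpers applied to the stripped word
theorem stepA_eq (S : PySem.Set (String × String)) (acc : List (List (String × String)))
    (w : List (String × String)) :
    stepA (S, acc) w = stepC (S, acc) (stripWord w) := by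
  unfold stepA stepC stripWord validB keyOf
  simp only []
  set wd := ((PySem.Dict.mk w).insert "english" (PySem.Str.strip ((PySem.Dict.mk w).getD "english" ""))).insert
      "dagbani" (PySem.Str.strip (((PySem.Dict.mk w).insert "english"
        (PySem.Str.strip ((PySem.Dict.mk w).getD "english" ""))).getD "dagbani" "")) with hwd
  have hmk : PySem.Dict.mk wd.items = wd := rfl
  rw [hmk]
  set e := wd.getD "english" ""
  set g := wd.getD "dagbani" ""
  by_cases h1 : e = "" ∨ g = ""
  · rw [if_pos h1]
    have : (!(e == "") && !(g == "") && decide (PySem.Str.len e ≤ 200) && decide (PySem.Str.len g ≤ 200)) = false := by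
      rcases h1 with h | h <;> simp [h]
    rw [this]
    simp
  · push_neg at h1
    by_cases h2 : 200 < PySem.Str.len e ∨ 200 < PySem.Str.len g
    · rw [if_neg (by tauto), if_pos h2]
      have : (!(e == "") && !(g == "") && decide (PySem.Str.len e ≤ 200) && decide (PySem.Str.len g ≤ 200)) = false := by
        rcases h2 with h | h
        · rw [decide_eq_false (by omega : ¬ PySem.Str.len e ≤ 200)]; simp
        · rw [decide_eq_false (by omega : ¬ PySem.Str.len g ≤ 200)]; simp
      rw [this]
      simp
    · push_neg at h2
      rw [if_neg (by tauto), if_neg (by push_neg; exact h2)]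
      have hv : (!(e == "") && !(g == "") && decide (PySem.Str.len e ≤ 200) && decide (PySem.Str.len g ≤ 200)) = true := by
        rw [decide_eq_true h2.1, decide_eq_true h2.2]
        simp [h1.1, h1.2]
      rw [hv]
      by_cases hc : PySem.Set.contains S (PySem.Str.lower e, PySem.Str.lower g) = true
      · rw [if_pos hc]
        have hm : (PySem.Str.lower e, PySem.Str.lower g) ∈ S := by
          simpa [PySem.Set.contains] using hc
        simp [hm]
      · rw [if_neg hc]
        simp only [Bool.not_eq_true] at hc
        have hm : (PySem.Str.lower e, PySem.Str.lower g) ∉ S := by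
          simpa [PySem.Set.contains] using hc
        simp [hm]

theorem main_lemma (full : List (List (String × String))) :
    ∀ (xs p : List (List (String × String))) (S : PySem.Set (String × String))
      (acc : List (List (String × String))),
      p ++ xs = full →
      (∀ k, PySem.Set.contains S k = p.any (fun u => validB u && decide (keyOf u = k))) →
      (xs.foldl stepC (S, acc)).2 =
      (PySem.List.enumerate xs (p.length : Int)).foldl
        (fun res iw =>
          if validB iw.2 &&
             !((PySem.List.slice full none (some iw.1)).any
                 (fun u => validB u && decide (keyOf u = keyOf iw.2)))
          then res ++ [iw.2] else res) acc := by
  intro xs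
  induction xs with
  | nil =>
    intro p S acc _ _
    simp [PySem.List.enumerate_nil]
  | cons x xs ih =>
    intro p S acc hfull hinv
    rw [PySem.List.enumerate_cons, List.foldl_cons, List.foldl_cons]
    have hslice : PySem.List.slice full none (some ((p.length : Nat) : Int)) = p := by
      rw [PySem.List.slice_to_natCast, ← hfull, List.take_left]
    have hlen : ((p ++ [x]).length : Int) = (p.length : Int) + 1 := by simp
    by_cases hc : (validB x && !(PySem.Set.contains S (keyOf x))) = true
    · obtain ⟨hval, hS⟩ : validB x = true ∧ PySem.Set.contains S (keyOf x) = false := by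
        simpa using hc
      have hhead : stepC (S, acc) x = (PySem.Set.add S (keyOf x), acc ++ [x]) := by
        unfold stepC; rw [if_pos hc]
      rw [hhead, if_pos (by
        show (validB x && !((PySem.List.slice full none (some (p.length : Int))).any fun u => validB u && decide (keyOf u = keyOf x))) = true
        rw [hslice, ← hinv (keyOf x)]; exact hc)]
      have := ih (p ++ [x]) (PySem.Set.add S (keyOf x)) (acc ++ [x])
        (by rw [List.append_assoc]; exact hfull)
        (by
          intro k
          rw [contains_add S (keyOf x) k hS, List.any_append, hinv k]
          simp only [List.any_cons, List.any_nil, hval, Bool.true_and, Bool.or_false]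
          by_cases hk : k = keyOf x
          · subst hk; simp
          · have hk2 : ¬ keyOf x = k := fun h => hk h.symm
            simp [hk, hk2])
      rw [hlen] at this
      exact this
    · rw [Bool.not_eq_true] at hc
      have hhead : stepC (S, acc) x = (S, acc) := by
        unfold stepC; rw [hc]; simp
      rw [hhead, if_neg (by
        show ¬ (validB x && !((PySem.List.slice full none (some (p.length : Int))).any fun u => validB u && decide (keyOf u = keyOf x))) = true
        rw [hslice, ← hinv (keyOf x), hc]; simp)]
      have := ih (p ++ [x]) S acc
        (by rw [List.append_assoc]; exact hfull)
        (by
          intro k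
          rw [List.any_append, hinv k]
          simp only [List.any_cons, List.any_nil, Bool.or_false]
          by_cases hval : validB x = true
          · have hS : PySem.Set.contains S (keyOf x) = true := by
              have h' := hc
              simp [hval] at h'
              simpa [PySem.Set.contains] using h'
            by_cases hk : keyOf x = k
            · subst hk
              rw [hinv (keyOf x)] at hS
              simp [hS, hval]
            · simp [hval, hk]
          · rw [Bool.not_eq_true] at hval
            simp [hval])
      rw [hlen] at this
      exact this

-- ===== VERDICT (by name: the statement is the Claim_ definition above) =====
theorem clean_and_deduplicate_spec : Claim_equal_clean_and_deduplicate := by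
  intro words _
  unfold Spec_clean_and_deduplicate
  have hA : clean_and_deduplicate words = (words.foldl stepA (PySem.Set.empty, [])).2 := rfl
  have hfun : stepA = fun st w => stepC st (stripWord w) := by
    funext st w
    cases st with
    | mk S acc => exact stepA_eq S acc w
  rw [hA, hfun, ← List.foldl_map]
  have hmain := main_lemma (words.map stripWord) (words.map stripWord) [] PySem.Set.empty []
    (by simp)
    (by intro k; simp [PySem.Set.contains, PySem.Set.empty])
  simpa [clean_and_deduplicate_alt] using hmain
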